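-- pv_equiv track=rewrite | github.com/QuantSysBio/inSPIRE | inspire/accession.py | get_accession_group
-- ===== SOURCE A (Python) =====
-- ACCESSION_SPLITTERS = {
--     'mascot': ',',
--     'msfragger': ',',
--     'maxquant': ';',
--     'peaks': ':',
-- }
--
-- def get_accession_group(accession, search_engine, accession_hierarchy, accession_groups):
--     """ Function to get the accession group from the accession of a peptide.
--
--     Parameters
--     ----------
--     accession : str
--         The accession of the peptide.
--     search_engine : str
--         The search engine which provided the data.
--     accession_hierarchy : list of str
--         The order in which groups should be assigned in case of multi-mappers.
--     accession_groups : dict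
--         A dictionary of mapping accession groups to the flag that will be seen
--         in the accession.
--     """
--     splitter = ACCESSION_SPLITTERS.get(search_engine)
--     if splitter is None:
--         raise ValueError(f'Unrecognised Search Engine: {search_engine}')
--
--     if accession in ('deNovo', 'unknown'):
--         return len(accession_hierarchy)
--
--     all_possible_accessions = accession.split(splitter)
--     assignment = None
--     for individiual_accession in all_possible_accessions:
--         found = False
--         for idx, acc in enumerate(accession_hierarchy):
--             if accession_groups[acc] in individiual_accession:
--                 if assignment is None or idx < assignment:
--                     assignment = idx
--                 found = True
--         if not found:
--             return 0
--     return assignment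
-- ===== SOURCE B (Python) =====
-- ACCESSION_SPLITTERS = {
--     'mascot': ',',
--     'msfragger': ',',
--     'maxquant': ';',
--     'peaks': ':',
-- }
--
-- def get_accession_group(accession, search_engine, accession_hierarchy, accession_groups):
--     """Two-phase re-implementation: first validate that every fragment of the
--     accession matches some hierarchy group (else 0), then scan the hierarchy in
--     order and return the first index whose group flag appears in any fragment."""
--     splitter = ACCESSION_SPLITTERS.get(search_engine)
--     if splitter is None:
--         raise ValueError(f'Unrecognised Search Engine: {search_engine}')
--
--     if accession in ('deNovo', 'unknown'):
--         return len(accession_hierarchy)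
--
--     fragments = accession.split(splitter)
--
--     # Phase 1: coverage check — every fragment must match some group.
--     for fragment in fragments:
--         if not any(accession_groups[acc] in fragment for acc in accession_hierarchy):
--             return 0
--
--     # Phase 2: smallest hierarchy index matching any fragment.
--     for idx, acc in enumerate(accession_hierarchy):
--         flag = accession_groups[acc]
--         if any(flag in fragment for fragment in fragments):
--             return idx
-- ===== Notes on version B (the rewrite author's own statement) =====
-- stated objective: alternative
-- what changed: Swapped the loop nesting into a two-phase scan: first a coverage pass over fragments (return 0 if any fragment matches no group), then a single pass over the hierarchy returning the first index matching any fragment, replacing A's running-minimum accumulator over per-fragment inner scans.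
import Mathlib
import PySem

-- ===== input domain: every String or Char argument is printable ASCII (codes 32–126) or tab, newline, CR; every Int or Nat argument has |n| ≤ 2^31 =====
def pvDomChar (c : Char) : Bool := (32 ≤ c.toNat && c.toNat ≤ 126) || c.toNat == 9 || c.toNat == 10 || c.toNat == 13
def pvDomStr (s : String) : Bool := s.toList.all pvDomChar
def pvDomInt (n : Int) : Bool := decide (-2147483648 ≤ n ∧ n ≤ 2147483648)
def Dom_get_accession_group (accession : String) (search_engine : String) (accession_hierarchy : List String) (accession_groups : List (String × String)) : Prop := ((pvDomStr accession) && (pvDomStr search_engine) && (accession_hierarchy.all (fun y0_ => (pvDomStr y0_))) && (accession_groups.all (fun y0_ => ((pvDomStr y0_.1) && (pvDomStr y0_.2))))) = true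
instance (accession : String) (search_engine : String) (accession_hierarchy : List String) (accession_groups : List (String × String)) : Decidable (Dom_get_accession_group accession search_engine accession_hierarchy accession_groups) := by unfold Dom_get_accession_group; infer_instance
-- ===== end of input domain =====

-- B replaces A's per-fragment inner hierarchy scans with a running minimum by a two-phase
-- scan (coverage check over fragments, then first matching hierarchy index); objective: alternative.

-- ===== PORT A =====
def ACCESSION_SPLITTERS : PySem.Dict String String :=
  PySem.Dict.ofList [("mascot", ","), ("msfragger", ","), ("maxquant", ";"), ("peaks", ":")]

-- inner loop of A: 'for idx, acc in enumerate(accession_hierarchy): …' ; none = KeyError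
def pvInnerA (groups : PySem.Dict String String) (frag : String) :
    List String → Int → Option Int → Bool → Option (Option Int × Bool)
  | [], _, assignment, found => some (assignment, found)
  | acc :: rest, idx, assignment, found =>
    match groups.get? acc with
    | none => none
    | some g =>
      if PySem.Str.isIn g frag then
        let assignment' : Option Int :=
          match assignment with
          | none => some idx
          | some a => if idx < a then some idx else some a
        pvInnerA groups frag rest (idx + 1) assignment' true
      else
        pvInnerA groups frag rest (idx + 1) assignment found

-- outer loop of A: 'for individiual_accession in all_possible_accessions: …'
def pvOuterA (groups : PySem.Dict String String) (hier : List String) :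
    List String → Option Int → Option (Option Int)
  | [], assignment => some assignment
  | frag :: rest, assignment =>
    match pvInnerA groups frag hier 0 assignment false with
    | none => none
    | some (assignment', found) =>
      if found then pvOuterA groups hier rest assignment' else some (some 0)

def get_accession_group (accession : String) (search_engine : String) (accession_hierarchy : List String) (accession_groups : List (String × String)) : Option Int :=
  match ACCESSION_SPLITTERS.get? search_engine with
  | none => none  -- raise ValueError
  | some splitter =>
    if accession = "deNovo" ∨ accession = "unknown" then
      some (accession_hierarchy.length : Int)
    else
      match PySem.Str.split? accession splitter with
      | none => none
      | some frags =>
        match pvOuterA (PySem.Dict.mk accession_groups) accession_hierarchy frags none with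
        | none => none  -- KeyError
        | some r => r

-- ===== PORT B =====
-- 'any(accession_groups[acc] in fragment for acc in accession_hierarchy)' ; none = KeyError
def pvAnyAcc (groups : PySem.Dict String String) (frag : String) : List String → Option Bool
  | [] => some false
  | acc :: rest =>
    match groups.get? acc with
    | none => none
    | some g => if PySem.Str.isIn g frag then some true else pvAnyAcc groups frag rest

-- phase 1: 'for fragment in fragments: if not any(…): return 0'
def pvAllFrags (groups : PySem.Dict String String) (hier : List String) : List String → Option Bool
  | [] => some true
  | frag :: rest =>
    match pvAnyAcc groups frag hier with
    | none => none
    | some b => if b then pvAllFrags groups hier rest else some false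

-- phase 2: 'for idx, acc in enumerate(accession_hierarchy): flag = …; if any(flag in fragment …): return idx'
def pvSelect (groups : PySem.Dict String String) (frags : List String) :
    List String → Int → Option (Option Int)
  | [], _ => some none
  | acc :: rest, idx =>
    match groups.get? acc with
    | none => none
    | some flag =>
      if frags.any (fun f => PySem.Str.isIn flag f) then some (some idx)
      else pvSelect groups frags rest (idx + 1)

def get_accession_group_alt (accession : String) (search_engine : String) (accession_hierarchy : List String) (accession_groups : List (String × String)) : Option Int :=
  match ACCESSION_SPLITTERS.get? search_engine with
  | none => none  -- raise ValueError
  | some splitter =>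
    if accession = "deNovo" ∨ accession = "unknown" then
      some (accession_hierarchy.length : Int)
    else
      match PySem.Str.split? accession splitter with
      | none => none
      | some frags =>
        match pvAllFrags (PySem.Dict.mk accession_groups) accession_hierarchy frags with
        | none => none  -- KeyError
        | some false => some 0
        | some true =>
          match pvSelect (PySem.Dict.mk accession_groups) frags accession_hierarchy 0 with
          | none => none  -- KeyError
          | some r => r

-- ===== PRECONDITION & SPEC =====
-- Pre_ excludes exactly the inputs where A raises: an unrecognised search engine (ValueError)
-- and, unless the deNovo/unknown shortcut fires, a hierarchy entry missing from accession_groups (KeyError).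
def Pre_get_accession_group (accession : String) (search_engine : String) (accession_hierarchy : List String) (accession_groups : List (String × String)) : Prop :=
  search_engine ∈ ["mascot", "msfragger", "maxquant", "peaks"] ∧
  (accession = "deNovo" ∨ accession = "unknown" ∨
    ∀ acc ∈ accession_hierarchy, acc ∈ accession_groups.map Prod.fst)
instance (accession : String) (search_engine : String) (accession_hierarchy : List String) (accession_groups : List (String × String)) : Decidable (Pre_get_accession_group accession search_engine accession_hierarchy accession_groups) := by unfold Pre_get_accession_group; infer_instance

def pvWitness_get_accession_group : String × String × List String × (List (String × String)) :=
  ("sp|P1,tr|Q2", "mascot", ["sp", "tr"], [("sp", "sp|"), ("tr", "tr|")])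

def Spec_get_accession_group (accession : String) (search_engine : String) (accession_hierarchy : List String) (accession_groups : List (String × String)) (out : Option Int) : Prop := out = get_accession_group_alt accession search_engine accession_hierarchy accession_groups
instance (accession : String) (search_engine : String) (accession_hierarchy : List String) (accession_groups : List (String × String)) (out : Option Int) : Decidable (Spec_get_accession_group accession search_engine accession_hierarchy accession_groups out) := by unfold Spec_get_accession_group; infer_instance

-- ===== CLAIM (what is proved, stated in full; the proofs are below) =====
def Claim_equal_get_accession_group : Prop := ∀ (accession : String) (search_engine : String) (accession_hierarchy : List String) (accession_groups : List (String × String)), Dom_get_accession_group accession search_engine accession_hierarchy accession_groups → Pre_get_accession_group accession search_engine accession_hierarchy accession_groups → Spec_get_accession_group accession search_engine accession_hierarchy accession_groups (get_accession_group accession search_engine accession_hierarchy accession_groups)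

-- ===== LEMMAS AND PROOFS =====

-- pure descriptions of both loops (valid once all hierarchy keys are present)
def pvOMin : Option Int → Option Int → Option Int
  | none, b => b
  | some a, none => some a
  | some a, some b => some (min a b)

def pvGD (groups : PySem.Dict String String) (acc : String) : String := (groups.get? acc).getD ""

-- index of the first hierarchy entry (from position idx) whose flag occurs in frag
def pvMIdx (groups : PySem.Dict String String) (frag : String) : List String → Int → Option Int
  | [], _ => none
  | acc :: rest, idx =>
    if PySem.Chars.isIn (pvGD groups acc).toList frag.toList then some idx
    else pvMIdx groups frag rest (idx + 1)

-- index of the first hierarchy entry (from position idx) whose flag occurs in SOME fragment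
def pvSel (groups : PySem.Dict String String) (frags : List String) : List String → Int → Option Int
  | [], _ => none
  | acc :: rest, idx =>
    if ∃ f ∈ frags, PySem.Chars.isIn (pvGD groups acc).toList f.toList = true then some idx
    else pvSel groups frags rest (idx + 1)

theorem pvOMin_none (a : Option Int) : pvOMin a none = a := by cases a <;> rfl

theorem pvOMin_absorb_right (a : Option Int) (i j : Int) (h : i ≤ j) :
    pvOMin (pvOMin a (some i)) (some j) = pvOMin a (some i) := by
  cases a <;> simp [pvOMin] <;> omega

theorem pvOMin_absorb_left (a : Option Int) (i j : Int) (h : i ≤ j) :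
    pvOMin (pvOMin a (some j)) (some i) = pvOMin a (some i) := by
  cases a <;> simp [pvOMin] <;> omega

theorem pvMIdx_lb (groups : PySem.Dict String String) (frag : String) :
    ∀ (hier : List String) (idx j : Int), pvMIdx groups frag hier idx = some j → idx ≤ j := by
  intro hier
  induction hier with
  | nil => intro idx j h; simp [pvMIdx] at h
  | cons acc rest ih =>
    intro idx j h
    by_cases hc : PySem.Chars.isIn (pvGD groups acc).toList frag.toList = true
    · simp [pvMIdx, hc] at h; omega
    · simp [pvMIdx, hc] at h
      have := ih (idx + 1) j h
      omega

theorem pvOMin_absorb_mIdx (groups : PySem.Dict String String) (frag : String)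
    (hier : List String) (a : Option Int) (i idx : Int) (h : i ≤ idx) :
    pvOMin (pvOMin a (some i)) (pvMIdx groups frag hier idx) = pvOMin a (some i) := by
  cases hm : pvMIdx groups frag hier idx with
  | none => simp [pvOMin_none]
  | some j =>
    have := pvMIdx_lb groups frag hier idx j hm
    exact pvOMin_absorb_right a i j (by omega)

theorem pvInnerA_eq (groups : PySem.Dict String String) (frag : String) :
    ∀ (hier : List String), (∀ acc ∈ hier, (groups.get? acc).isSome = true) →
    ∀ (idx : Int) (a : Option Int) (f : Bool),
    pvInnerA groups frag hier idx a f =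
      some (pvOMin a (pvMIdx groups frag hier idx), f || (pvMIdx groups frag hier idx).isSome) := by
  intro hier
  induction hier with
  | nil => intro _ idx a f; simp [pvInnerA, pvMIdx, pvOMin_none]
  | cons acc rest ih =>
    intro hk idx a f
    obtain ⟨g, hg⟩ := Option.isSome_iff_exists.mp (hk acc (by simp))
    have hk' : ∀ acc' ∈ rest, (groups.get? acc').isSome = true := by
      intro acc' h'; exact hk acc' (by simp [h'])
    have hgd : pvGD groups acc = g := by simp [pvGD, hg]
    by_cases hc : PySem.Chars.isIn g.toList frag.toList = true
    · have hupd : (match a with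
        | none => some idx
        | some x => if idx < x then some idx else some x) = pvOMin a (some idx) := by
        cases a with
        | none => rfl
        | some x => simp [pvOMin, min_def]; split_ifs <;> simp <;> omega
      simp only [pvInnerA, hg, PySem.Str.isIn_eq, hc, if_true, hupd]
      rw [ih hk' (idx + 1) (pvOMin a (some idx)) true]
      simp [pvMIdx, hgd, hc, pvOMin_absorb_mIdx groups frag rest a idx (idx + 1) (by omega)]
    · simp only [pvInnerA, hg, PySem.Str.isIn_eq, hc]
      rw [ih hk' (idx + 1) a f]
      simp [pvMIdx, hgd, hc]

theorem pvOuterA_eq (groups : PySem.Dict String String) (hier : List String)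
    (hk : ∀ acc ∈ hier, (groups.get? acc).isSome = true) :
    ∀ (frags : List String) (a : Option Int),
    pvOuterA groups hier frags a =
      some (if frags.all (fun f => (pvMIdx groups f hier 0).isSome) then
              frags.foldl (fun acc f => pvOMin acc (pvMIdx groups f hier 0)) a
            else some 0) := by
  intro frags
  induction frags with
  | nil => intro a; simp [pvOuterA]
  | cons frag rest ih =>
    intro a
    simp only [pvOuterA, pvInnerA_eq groups frag hier hk 0 a false, Bool.false_or]
    cases hf : (pvMIdx groups frag hier 0).isSome with
    | true => simp [hf, ih]
    | false => simp [hf]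

theorem pvAnyAcc_eq (groups : PySem.Dict String String) (frag : String) :
    ∀ (hier : List String), (∀ acc ∈ hier, (groups.get? acc).isSome = true) →
    ∀ (idx : Int), pvAnyAcc groups frag hier = some (pvMIdx groups frag hier idx).isSome := by
  intro hier
  induction hier with
  | nil => intro _ idx; simp [pvAnyAcc, pvMIdx]
  | cons acc rest ih =>
    intro hk idx
    obtain ⟨g, hg⟩ := Option.isSome_iff_exists.mp (hk acc (by simp))
    have hk' : ∀ acc' ∈ rest, (groups.get? acc').isSome = true := by
      intro acc' h'; exact hk acc' (by simp [h'])
    have hgd : pvGD groups acc = g := by simp [pvGD, hg]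
    by_cases hc : PySem.Chars.isIn g.toList frag.toList = true
    · simp [pvAnyAcc, hg, pvMIdx, hgd, hc]
    · simp [pvAnyAcc, hg, pvMIdx, hgd, hc, ih hk' (idx + 1)]

theorem pvAllFrags_eq (groups : PySem.Dict String String) (hier : List String)
    (hk : ∀ acc ∈ hier, (groups.get? acc).isSome = true) :
    ∀ (frags : List String),
    pvAllFrags groups hier frags = some (frags.all (fun f => (pvMIdx groups f hier 0).isSome)) := by
  intro frags
  induction frags with
  | nil => simp [pvAllFrags]
  | cons frag rest ih =>
    simp only [pvAllFrags, pvAnyAcc_eq groups frag hier hk 0]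
    cases hf : (pvMIdx groups frag hier 0).isSome with
    | true => simp [hf, ih]
    | false => simp [hf]

theorem pvSelect_eq (groups : PySem.Dict String String) (frags : List String) :
    ∀ (hier : List String), (∀ acc ∈ hier, (groups.get? acc).isSome = true) →
    ∀ (idx : Int), pvSelect groups frags hier idx = some (pvSel groups frags hier idx) := by
  intro hier
  induction hier with
  | nil => intro _ idx; simp [pvSelect, pvSel]
  | cons acc rest ih =>
    intro hk idx
    obtain ⟨g, hg⟩ := Option.isSome_iff_exists.mp (hk acc (by simp))
    have hk' : ∀ acc' ∈ rest, (groups.get? acc').isSome = true := by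
      intro acc' h'; exact hk acc' (by simp [h'])
    have hgd : pvGD groups acc = g := by simp [pvGD, hg]
    by_cases hc : ∃ f ∈ frags, PySem.Chars.isIn g.toList f.toList = true
    · simp [pvSelect, hg, pvSel, hgd, hc]
    · simp [pvSelect, hg, pvSel, hgd, hc, ih hk' (idx + 1)]

-- fold stays fixed once the accumulator is ≤ every upcoming match index
theorem pvFold_ge (groups : PySem.Dict String String) (hier : List String) (idx : Int) :
    ∀ (frags : List String) (i : Int), i ≤ idx →
    frags.foldl (fun acc f => pvOMin acc (pvMIdx groups f hier idx)) (some i) = some i := by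
  intro frags
  induction frags with
  | nil => intro i _; simp
  | cons frag rest ih =>
    intro i hi
    have hstep : pvOMin (some i) (pvMIdx groups frag hier idx) = some i := by
      cases hm : pvMIdx groups frag hier idx with
      | none => simp [pvOMin_none]
      | some j =>
        have := pvMIdx_lb groups frag hier idx j hm
        simp [pvOMin]; omega
    simp only [List.foldl_cons, hstep, ih i hi]

theorem pvFold_hit (groups : PySem.Dict String String) (acc : String) (rest : List String) (idx : Int) :
    ∀ (frags : List String) (a : Option Int),
    (∃ f ∈ frags, PySem.Chars.isIn (pvGD groups acc).toList f.toList = true) →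
    frags.foldl (fun acc' f => pvOMin acc' (pvMIdx groups f (acc :: rest) idx)) a = pvOMin a (some idx) := by
  intro frags
  induction frags with
  | nil => intro a h; simp at h
  | cons frag fr ih =>
    intro a h
    by_cases hc : PySem.Chars.isIn (pvGD groups acc).toList frag.toList = true
    · have hμ : pvMIdx groups frag (acc :: rest) idx = some idx := by simp [pvMIdx, hc]
      simp only [List.foldl_cons, hμ]
      have ha' : ∃ i, pvOMin a (some idx) = some i ∧ i ≤ idx := by
        cases a with
        | none => exact ⟨idx, rfl, le_refl _⟩
        | some x => exact ⟨min x idx, rfl, min_le_right _ _⟩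
      obtain ⟨i, hi, hle⟩ := ha'
      rw [hi, pvFold_ge groups (acc :: rest) idx fr i hle]
    · have hμ : pvMIdx groups frag (acc :: rest) idx = pvMIdx groups frag rest (idx + 1) := by
        simp [pvMIdx, hc]
      have hh : ∃ f ∈ fr, PySem.Chars.isIn (pvGD groups acc).toList f.toList = true := by
        rcases h with ⟨f, hf, hfc⟩
        rcases List.mem_cons.mp hf with rfl | hmem
        · exact absurd hfc hc
        · exact ⟨f, hmem, hfc⟩
      simp only [List.foldl_cons, hμ, ih _ hh]
      cases hm : pvMIdx groups frag rest (idx + 1) with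
      | none => rw [pvOMin_none]
      | some j =>
        have := pvMIdx_lb groups frag rest (idx + 1) j hm
        exact pvOMin_absorb_left a idx j (by omega)

-- the crux: A's running minimum over per-fragment first matches equals B's first index matching any fragment
theorem pvFold_eq_sel (groups : PySem.Dict String String) (frags : List String) :
    ∀ (hier : List String) (idx : Int) (a : Option Int),
    frags.foldl (fun acc f => pvOMin acc (pvMIdx groups f hier idx)) a =
      pvOMin a (pvSel groups frags hier idx) := by
  intro hier
  induction hier with
  | nil =>
    intro idx a
    simp only [pvSel, pvOMin_none]
    induction frags with
    | nil => simp
    | cons f fr ih => simp [pvMIdx, pvOMin_none, ih]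
  | cons acc rest ih =>
    intro idx a
    by_cases hc : ∃ f ∈ frags, PySem.Chars.isIn (pvGD groups acc).toList f.toList = true
    · rw [pvFold_hit groups acc rest idx frags a hc]
      simp [pvSel, hc]
    · have hnone : ∀ f ∈ frags, PySem.Chars.isIn (pvGD groups acc).toList f.toList = false := by
        intro f hf
        rcases Bool.eq_false_or_eq_true (PySem.Chars.isIn (pvGD groups acc).toList f.toList) with h1 | h0
        · exact absurd ⟨f, hf, h1⟩ hc
        · exact h0
      have hcongr : frags.foldl (fun acc' f => pvOMin acc' (pvMIdx groups f (acc :: rest) idx)) a =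
          frags.foldl (fun acc' f => pvOMin acc' (pvMIdx groups f rest (idx + 1))) a := by
        apply PySem.List.foldl_congr_mem
        intro acc' f hf
        simp [pvMIdx, hnone f hf]
      rw [hcongr, ih (idx + 1) a]
      simp [pvSel, hc]

-- all hierarchy keys are present in the dict once Pre_ holds (non-shortcut case)
theorem pvKeys_present (accession_groups : List (String × String)) (acc : String)
    (h : acc ∈ accession_groups.map Prod.fst) :
    ((PySem.Dict.mk accession_groups).get? acc).isSome = true := by
  induction accession_groups with
  | nil => simp at h
  | cons p rest ih =>
    rcases p with ⟨k, v⟩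
    rw [PySem.Dict.get?_mk_cons]
    by_cases hp : k = acc
    · simp [hp]
    · have : acc ∈ rest.map Prod.fst := by
        simp at h
        rcases h with h | h
        · exact absurd h.symm hp
        · simpa using h
      simp [hp, ih this]

-- ===== VERDICT (by name: the statement is the Claim_ definition above) =====
theorem get_accession_group_spec : Claim_equal_get_accession_group := by
  intro accession search_engine accession_hierarchy accession_groups _ hpre
  obtain ⟨hse, hrest⟩ := hpre
  unfold Spec_get_accession_group get_accession_group get_accession_group_alt
  obtain ⟨splitter, hsp⟩ : ∃ sp, ACCESSION_SPLITTERS.get? search_engine = some sp := by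
    simp only [List.mem_cons, List.not_mem_nil, or_false] at hse
    rcases hse with rfl | rfl | rfl | rfl
    · exact ⟨",", rfl⟩
    · exact ⟨",", rfl⟩
    · exact ⟨";", rfl⟩
    · exact ⟨":", rfl⟩
  rw [hsp]
  by_cases hdn : accession = "deNovo" ∨ accession = "unknown"
  · simp only [if_pos hdn]
  · simp only [if_neg hdn]
    have hk : ∀ acc ∈ accession_hierarchy, ((PySem.Dict.mk accession_groups).get? acc).isSome = true := by
      rcases hrest with h | h | h
      · exact absurd (Or.inl h) hdn
      · exact absurd (Or.inr h) hdn
      · intro acc hacc; exact pvKeys_present accession_groups acc (h acc hacc)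
    cases hfr : PySem.Str.split? accession splitter with
    | none => rfl
    | some frags =>
      dsimp only
      rw [pvOuterA_eq (PySem.Dict.mk accession_groups) accession_hierarchy hk frags none,
          pvAllFrags_eq (PySem.Dict.mk accession_groups) accession_hierarchy hk frags,
          pvSelect_eq (PySem.Dict.mk accession_groups) frags accession_hierarchy hk 0]
      cases hall : frags.all (fun f => (pvMIdx (PySem.Dict.mk accession_groups) f accession_hierarchy 0).isSome) with
      | true =>
        simp only [if_pos rfl]
        rw [pvFold_eq_sel (PySem.Dict.mk accession_groups) frags accession_hierarchy 0 none]
        rfl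
      | false => simp
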